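-- pv_equiv track=rewrite | github.com/SplootCode/splootcode | python/generate_builtins.py | short_doc
-- ===== SOURCE A (Python) =====
-- def short_doc(doc):
--     if not doc:
--         return ''
--     short = doc
--     if '.' in doc and 10 < doc.index('.') < 100:
--         short = doc.split('.')[0] + '.'
--     elif '\n' in doc and doc.index('\n') < 100:
--         short = doc.split('\n')[0]
--     elif len(doc) > 140:
--         short = doc[:97] + '...'
--
--     lines = doc.split('\n')
--     if '->' in short and len(lines) > 2:
--         remainder = '\n'.join(lines[1:])
--         return short_doc(remainder.strip())
--
--     return short
-- ===== SOURCE B (Python) =====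
-- def short_doc(doc):
--     # Iterative version using find/slicing instead of recursion + split/join.
--     while doc:
--         p = doc.find('.')
--         q = doc.find('\n')
--         if 10 < p < 100:
--             short = doc[:p + 1]
--         elif 0 <= q < 100:
--             short = doc[:q]
--         elif len(doc) > 140:
--             short = doc[:97] + '...'
--         else:
--             short = doc
--         if '->' in short and doc.count('\n') > 1:
--             doc = doc[q + 1:].strip()
--         else:
--             return short
--     return ''
-- ===== Notes on version B (the rewrite author's own statement) =====
-- stated objective: alternative
-- what changed: Replaces tail recursion plus split/index/join-based string surgery with an iterative while-loop that works from the two find() offsets alone, taking the summary and the remainder as direct slices doc[:p+1]/doc[:q]/doc[q+1:] and testing the three-line condition by counting newline characters, so no intermediate line list is ever built.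
import Mathlib
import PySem

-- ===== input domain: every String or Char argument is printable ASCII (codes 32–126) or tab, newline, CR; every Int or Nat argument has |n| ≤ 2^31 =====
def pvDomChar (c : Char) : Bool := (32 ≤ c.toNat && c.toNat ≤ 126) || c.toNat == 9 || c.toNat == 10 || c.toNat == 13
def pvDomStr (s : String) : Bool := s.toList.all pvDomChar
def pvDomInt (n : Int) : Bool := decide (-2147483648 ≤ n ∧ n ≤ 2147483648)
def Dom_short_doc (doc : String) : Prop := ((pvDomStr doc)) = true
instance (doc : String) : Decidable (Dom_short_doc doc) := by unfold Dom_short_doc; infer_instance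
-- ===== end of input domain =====

-- B replaces A's tail recursion plus split/index/join string surgery by an iterative loop
-- working from the two find() offsets with direct slices (objective: alternative decomposition).


-- ===== shared toolkit (needed by the ports' decreasing_by proofs, cited there by name) =====

-- reference splitter for a single-character separator (proof tool; neither port computes with it)
def splitC (c : Char) : List Char → List (List Char)
  | [] => [[]]
  | a :: t =>
      if a = c then [] :: splitC c t
      else (a :: (splitC c t).headD []) :: (splitC c t).tail

theorem splitC_ne_nil (c : Char) (cs : List Char) : splitC c cs ≠ [] := by
  induction cs with
  | nil => simp [splitC]
  | cons a t ih => by_cases h : a = c <;> simp [splitC, h]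

theorem find_go_single (c : Char) (cs : List Char) : ∀ k : Nat,
    PySem.Chars.find.go [c] cs k = if c ∈ cs then ((k + cs.idxOf c : Nat) : Int) else -1 := by
  induction cs with
  | nil => intro k; simp [PySem.Chars.find.go]
  | cons a t ih =>
      intro k
      by_cases h : a = c
      · subst h; simp [PySem.Chars.find.go, List.isPrefixOf]
      · have h' : ¬ c = a := fun hh => h hh.symm
        simp only [PySem.Chars.find.go, List.isPrefixOf, List.mem_cons, ih]
        by_cases hm : c ∈ t <;> simp [hm, h, h'] <;> omega

theorem find_single (c : Char) (cs : List Char) :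
    PySem.Chars.find cs [c] = if c ∈ cs then ((cs.idxOf c : Nat) : Int) else -1 := by
  simpa using find_go_single c cs 0

theorem count_go_single (c : Char) (cs : List Char) : ∀ fuel acc : Nat, cs.length ≤ fuel →
    PySem.Chars.count.go [c] fuel cs acc = acc + cs.count c := by
  induction cs with
  | nil => intro fuel acc h; cases fuel <;> simp [PySem.Chars.count.go]
  | cons a t ih =>
      intro fuel acc h
      cases fuel with
      | zero => simp at h
      | succ f =>
          by_cases hc : a = c
          · subst hc
            simp [PySem.Chars.count.go, List.isPrefixOf, ih f (acc+1) (by simpa using h),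
              List.count_cons_self]
            omega
          · have hc' : ¬ c = a := fun hh => hc hh.symm
            simp [PySem.Chars.count.go, List.isPrefixOf, hc, hc',
              ih f acc (by simpa using h), List.count_cons]

theorem count_single (c : Char) (cs : List Char) :
    PySem.Chars.count cs [c] = cs.count c := by
  simp [PySem.Chars.count, count_go_single c cs cs.length 0 le_rfl]

theorem splitOn_go_single (c : Char) (cs : List Char) :
    ∀ fuel : Nat, ∀ cur : List Char, ∀ acc : List (List Char), cs.length < fuel →
    PySem.Chars.splitOn.go [c] fuel cs cur acc
      = acc.reverse ++ List.modifyHead (cur.reverse ++ ·) (splitC c cs) := by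
  induction cs with
  | nil =>
      intro fuel cur acc h
      cases fuel with
      | zero => omega
      | succ f => simp [PySem.Chars.splitOn.go, splitC]
  | cons a t ih =>
      intro fuel cur acc h
      cases fuel with
      | zero => omega
      | succ f =>
          by_cases hc : a = c
          · subst hc
            simp [PySem.Chars.splitOn.go, List.isPrefixOf, ih f [] (cur.reverse :: acc)
              (by simpa using h), splitC]
            rcases splitC a t with _ | ⟨hd, tl⟩ <;> simp
          · have hc' : ¬ c = a := fun hh => hc hh.symm
            have hx := ih f (a :: cur) acc (by simpa using h)
            simp [PySem.Chars.splitOn.go, List.isPrefixOf, hc', hx, splitC, hc]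
            rcases hh : splitC c t with _ | ⟨hd, tl⟩
            · exact absurd hh (splitC_ne_nil c t)
            · simp

theorem splitOn_single (c : Char) (cs : List Char) :
    PySem.Chars.splitOn cs [c] = splitC c cs := by
  simp only [PySem.Chars.splitOn]
  rw [splitOn_go_single c cs (cs.length + 1) [] [] (by omega)]
  rcases splitC c cs with _ | ⟨hd, tl⟩ <;> simp

theorem splitC_length (c : Char) (cs : List Char) :
    (splitC c cs).length = cs.count c + 1 := by
  induction cs with
  | nil => simp [splitC]
  | cons a t ih =>
      by_cases h : a = c
      · subst h; simp [splitC, List.count_cons_self, ih]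
      · have h' : ¬ c = a := fun hh => h hh.symm
        have := splitC_ne_nil c t
        simp [splitC, h, h', List.count_cons, List.length_tail, ih]
        try omega

theorem inter_cons2 (s a b : List Char) (r : List (List Char)) :
    List.intercalate s (a :: b :: r) = a ++ s ++ List.intercalate s (b :: r) := by
  simp [List.intercalate]

theorem splitC_intercalate (c : Char) (cs : List Char) :
    List.intercalate [c] (splitC c cs) = cs := by
  induction cs with
  | nil => simp [splitC, List.intercalate]
  | cons a t ih =>
      by_cases h : a = c
      · subst h
        have hs : splitC a (a :: t) = [] :: splitC a t := by simp [splitC]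
        rw [hs]
        rcases hh : splitC a t with _ | ⟨hd, tl⟩
        · exact absurd hh (splitC_ne_nil a t)
        · rw [inter_cons2, ← hh, ih]; simp
      · have hs : splitC c (a :: t) = (a :: (splitC c t).headD []) :: (splitC c t).tail := by
          simp [splitC, h]
        rw [hs]
        rcases hh : splitC c t with _ | ⟨hd, tl⟩
        · exact absurd hh (splitC_ne_nil c t)
        · simp only [hh, List.headD_cons, List.tail_cons]
          cases tl with
          | nil =>
              rw [hh] at ih
              simp [List.intercalate] at ih
              simp [List.intercalate, ih]
          | cons x xs =>
              rw [hh, inter_cons2] at ih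
              rw [inter_cons2]
              simpa using ih

theorem idxOf_cons_ne (c a : Char) (t : List Char) (h : ¬ a = c) :
    List.idxOf c (a :: t) = List.idxOf c t + 1 := by
  have h' : ¬ a == c := by simpa using h
  simp [List.idxOf_cons, h']

theorem splitC_tail_join (c : Char) (cs : List Char) (h : c ∈ cs) :
    List.intercalate [c] ((splitC c cs).tail) = cs.drop (cs.idxOf c + 1) := by
  induction cs with
  | nil => simp at h
  | cons a t ih =>
      by_cases hc : a = c
      · subst hc; simp [splitC, List.idxOf_cons, splitC_intercalate]
      · have hm : c ∈ t := by
          rcases List.mem_cons.mp h with h1 | h1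
          · exact absurd h1.symm hc
          · exact h1
        have := splitC_ne_nil c t
        simp [splitC, hc, idxOf_cons_ne c a t hc, ih hm]

theorem strip_length_le (cs : List Char) : (PySem.Chars.strip cs).length ≤ cs.length := by
  simp [PySem.Chars.strip, PySem.Chars.rstrip, PySem.Chars.lstrip]
  calc (List.dropWhile PySem.Chars.isspace (List.dropWhile PySem.Chars.isspace cs).reverse).length
      ≤ (List.dropWhile PySem.Chars.isspace cs).reverse.length := List.length_dropWhile_le _ _
    _ ≤ cs.length := by simpa using List.length_dropWhile_le PySem.Chars.isspace cs

theorem mem_of_one_lt_count (c : Char) (cs : List Char) (h : 1 < cs.count c) : c ∈ cs := by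
  by_contra hm
  simp [List.count_eq_zero_of_not_mem hm] at h

theorem aRec_lt (cs : List Char) (h : 2 < (PySem.Chars.splitOn cs ['\n']).length) :
    (PySem.Chars.strip (PySem.Chars.join ['\n'] ((PySem.Chars.splitOn cs ['\n']).drop 1))).length
      < cs.length := by
  rw [splitOn_single] at h ⊢
  have hcnt : 1 < cs.count '\n' := by have := splitC_length '\n' cs; omega
  have hm : '\n' ∈ cs := mem_of_one_lt_count _ _ hcnt
  have hidx := List.idxOf_lt_length_of_mem hm
  have hj : PySem.Chars.join ['\n'] ((splitC '\n' cs).drop 1) = cs.drop (cs.idxOf '\n' + 1) := by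
    rw [PySem.Chars.join, List.drop_one, splitC_tail_join '\n' cs hm]
  rw [hj]
  calc (PySem.Chars.strip (cs.drop (cs.idxOf '\n' + 1))).length
      ≤ (cs.drop (cs.idxOf '\n' + 1)).length := strip_length_le _
    _ < cs.length := by simp [List.length_drop]; omega

theorem bRec_lt (cs : List Char) (h : 1 < PySem.Chars.count cs ['\n']) :
    (PySem.Chars.strip (PySem.Chars.slice cs (some (PySem.Chars.find cs ['\n'] + 1)) none)).length
      < cs.length := by
  rw [count_single] at h
  have hm : '\n' ∈ cs := mem_of_one_lt_count _ _ h
  have hidx := List.idxOf_lt_length_of_mem hm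
  rw [PySem.Chars.slice_eq_listSlice, find_single, if_pos hm,
    PySem.List.slice_from cs (by positivity)]
  calc (PySem.Chars.strip (List.drop ((cs.idxOf '\n' : Int) + 1).toNat cs)).length
      ≤ (List.drop ((cs.idxOf '\n' : Int) + 1).toNat cs).length := strip_length_le _
    _ < cs.length := by
        have : ((cs.idxOf '\n' : Int) + 1).toNat = cs.idxOf '\n' + 1 := by omega
        simp [this, List.length_drop]; omega

-- ===== PORT A =====
-- A on code points (recursion mirrors A's tail recursion; doc.index(x) under an 'x in doc'
-- guard is Chars.find; doc.split(x)[0] is headD of the never-empty split result)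
def aCore (cs : List Char) : List Char :=
  if cs = [] then []                                  -- if not doc: return ''
  else
    let short := cs                                   -- short = doc
    let short :=
      if PySem.Chars.isIn ['.'] cs = true ∧
          10 < PySem.Chars.find cs ['.'] ∧ PySem.Chars.find cs ['.'] < 100 then
        (PySem.Chars.splitOn cs ['.']).headD [] ++ ['.']        -- doc.split('.')[0] + '.'
      else if PySem.Chars.isIn ['\n'] cs = true ∧ PySem.Chars.find cs ['\n'] < 100 then
        (PySem.Chars.splitOn cs ['\n']).headD []                -- doc.split('\n')[0]
      else if 140 < cs.length then
        PySem.Chars.slice cs none (some 97) ++ ['.', '.', '.']  -- doc[:97] + '...'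
      else short
    let lines := PySem.Chars.splitOn cs ['\n']        -- lines = doc.split('\n')
    if h : PySem.Chars.isIn ['-', '>'] short = true ∧ 2 < lines.length then
      aCore (PySem.Chars.strip (PySem.Chars.join ['\n'] (lines.drop 1)))
    else short
termination_by cs.length
decreasing_by exact aRec_lt cs h.2

def short_doc (doc : String) : String := String.ofList (aCore doc.toList)

-- ===== PORT B =====
-- B on code points (the while-loop is the tail recursion on the stripped remainder slice)
def bCore (cs : List Char) : List Char :=
  if cs = [] then []                                  -- while doc: … / return ''
  else
    let p := PySem.Chars.find cs ['.']                -- p = doc.find('.')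
    let q := PySem.Chars.find cs ['\n']               -- q = doc.find('\n')
    let short :=
      if 10 < p ∧ p < 100 then PySem.Chars.slice cs none (some (p + 1))      -- doc[:p+1]
      else if 0 ≤ q ∧ q < 100 then PySem.Chars.slice cs none (some q)        -- doc[:q]
      else if 140 < cs.length then PySem.Chars.slice cs none (some 97) ++ ['.', '.', '.']
      else cs
    if h : PySem.Chars.isIn ['-', '>'] short = true ∧ 1 < PySem.Chars.count cs ['\n'] then
      bCore (PySem.Chars.strip (PySem.Chars.slice cs (some (q + 1)) none))   -- doc[q+1:].strip()
    else short
termination_by cs.length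
decreasing_by exact bRec_lt cs h.2

def short_doc_alt (doc : String) : String := String.ofList (bCore doc.toList)

-- ===== PRECONDITION & SPEC =====
def Spec_short_doc (doc : String) (out : String) : Prop := out = short_doc_alt doc
instance (doc : String) (out : String) : Decidable (Spec_short_doc doc out) := by unfold Spec_short_doc; infer_instance

-- ===== CLAIM (what is proved, stated in full; the proofs are below) =====
def Claim_equal_short_doc : Prop := ∀ (doc : String), Dom_short_doc doc → Spec_short_doc doc (short_doc doc)

-- ===== LEMMAS AND PROOFS =====

theorem isIn_single (c : Char) (cs : List Char) :
    PySem.Chars.isIn [c] cs = decide (c ∈ cs) := by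
  by_cases hm : c ∈ cs <;> simp [PySem.Chars.isIn, find_single, hm]

theorem splitC_headD (c : Char) (cs : List Char) :
    (splitC c cs).headD [] = cs.takeWhile (fun a => !decide (a = c)) := by
  induction cs with
  | nil => simp [splitC]
  | cons a t ih =>
      by_cases h : a = c
      · subst h; simp [splitC, List.takeWhile_cons]
      · simp only [splitC, if_neg h]
        simp [List.takeWhile_cons, h, List.headD] at ih ⊢
        exact ih

theorem takeWhile_eq_take_idxOf (c : Char) (cs : List Char) (h : c ∈ cs) :
    cs.takeWhile (fun a => !decide (a = c)) = cs.take (cs.idxOf c) := by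
  induction cs with
  | nil => simp at h
  | cons a t ih =>
      by_cases hc : a = c
      · subst hc; simp [List.takeWhile_cons, List.idxOf_cons]
      · have hm : c ∈ t := by
          rcases List.mem_cons.mp h with h1 | h1
          · exact absurd h1.symm hc
          · exact h1
        simp [List.takeWhile_cons, hc, idxOf_cons_ne c a t hc, ih hm]

theorem take_idxOf_succ (c : Char) (cs : List Char) (h : c ∈ cs) :
    cs.take (cs.idxOf c + 1) = cs.takeWhile (fun a => !decide (a = c)) ++ [c] := by
  induction cs with
  | nil => simp at h
  | cons a t ih =>
      by_cases hc : a = c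
      · subst hc; simp [List.takeWhile_cons, List.idxOf_cons]
      · have hm : c ∈ t := by
          rcases List.mem_cons.mp h with h1 | h1
          · exact absurd h1.symm hc
          · exact h1
        simp [List.takeWhile_cons, hc, idxOf_cons_ne c a t hc, ih hm]


theorem mem_of_find_pos (c : Char) (cs : List Char) (h : 0 ≤ PySem.Chars.find cs [c]) :
    c ∈ cs := by
  by_contra hm
  rw [find_single, if_neg hm] at h
  omega

theorem find_toNat (c : Char) (cs : List Char) (h : c ∈ cs) :
    (PySem.Chars.find cs [c]).toNat = cs.idxOf c := by
  rw [find_single, if_pos h]; omega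

theorem head_piece_eq (c : Char) (cs : List Char) (h : 0 ≤ PySem.Chars.find cs [c]) :
    (PySem.Chars.splitOn cs [c]).headD [] = PySem.Chars.slice cs none (some (PySem.Chars.find cs [c])) := by
  have hm := mem_of_find_pos c cs h
  rw [PySem.Chars.slice_eq_listSlice, PySem.List.slice_to cs h, find_toNat c cs hm,
    splitOn_single, splitC_headD, takeWhile_eq_take_idxOf c cs hm]

theorem head_piece_dot_eq (c : Char) (cs : List Char) (h : 0 ≤ PySem.Chars.find cs [c]) :
    (PySem.Chars.splitOn cs [c]).headD [] ++ [c]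
      = PySem.Chars.slice cs none (some (PySem.Chars.find cs [c] + 1)) := by
  have hm := mem_of_find_pos c cs h
  have h1 : (PySem.Chars.find cs [c] + 1).toNat = cs.idxOf c + 1 := by
    rw [find_single, if_pos hm]; omega
  rw [PySem.Chars.slice_eq_listSlice, PySem.List.slice_to cs (by omega), h1,
    splitOn_single, splitC_headD, take_idxOf_succ c cs hm]

theorem tail_join_eq (c : Char) (cs : List Char) (h : 0 ≤ PySem.Chars.find cs [c]) :
    PySem.Chars.join [c] ((PySem.Chars.splitOn cs [c]).drop 1)
      = List.drop (cs.idxOf c + 1) cs := by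
  have hm := mem_of_find_pos c cs h
  rw [PySem.Chars.join, splitOn_single, List.drop_one, splitC_tail_join c cs hm]

theorem core_eq (cs : List Char) : aCore cs = bCore cs := by
  generalize hn : cs.length = n
  induction n using Nat.strong_induction_on generalizing cs with
  | _ n ih =>
  subst hn
  rw [aCore, bCore]
  by_cases h0 : cs = []
  · simp [h0]
  simp only [if_neg h0]
  have hdotIn : 10 < PySem.Chars.find cs ['.'] → PySem.Chars.isIn ['.'] cs = true := by
    intro hp
    rw [isIn_single]
    exact decide_eq_true (mem_of_find_pos '.' cs (by omega))
  have hnlIn : PySem.Chars.isIn ['\n'] cs = true ↔ 0 ≤ PySem.Chars.find cs ['\n'] := by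
    rw [isIn_single]
    constructor
    · intro hmem
      rw [find_single, if_pos (of_decide_eq_true hmem)]
      omega
    · intro h
      exact decide_eq_true (mem_of_find_pos '\n' cs h)
  have hshort :
      (if PySem.Chars.isIn ['.'] cs = true ∧
            10 < PySem.Chars.find cs ['.'] ∧ PySem.Chars.find cs ['.'] < 100 then
          (PySem.Chars.splitOn cs ['.']).headD [] ++ ['.']
        else if PySem.Chars.isIn ['\n'] cs = true ∧ PySem.Chars.find cs ['\n'] < 100 then
          (PySem.Chars.splitOn cs ['\n']).headD []
        else if 140 < cs.length then
          PySem.Chars.slice cs none (some 97) ++ ['.', '.', '.']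
        else cs)
      = (if 10 < PySem.Chars.find cs ['.'] ∧ PySem.Chars.find cs ['.'] < 100 then
          PySem.Chars.slice cs none (some (PySem.Chars.find cs ['.'] + 1))
        else if 0 ≤ PySem.Chars.find cs ['\n'] ∧ PySem.Chars.find cs ['\n'] < 100 then
          PySem.Chars.slice cs none (some (PySem.Chars.find cs ['\n']))
        else if 140 < cs.length then
          PySem.Chars.slice cs none (some 97) ++ ['.', '.', '.']
        else cs) := by
    by_cases h1 : 10 < PySem.Chars.find cs ['.'] ∧ PySem.Chars.find cs ['.'] < 100
    · rw [if_pos ⟨hdotIn h1.1, h1⟩, if_pos h1, head_piece_dot_eq '.' cs (by omega)]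
    · have h1' : ¬ (PySem.Chars.isIn ['.'] cs = true ∧
          10 < PySem.Chars.find cs ['.'] ∧ PySem.Chars.find cs ['.'] < 100) := by
        intro hx; exact h1 hx.2
      rw [if_neg h1', if_neg h1]
      by_cases h2 : 0 ≤ PySem.Chars.find cs ['\n'] ∧ PySem.Chars.find cs ['\n'] < 100
      · rw [if_pos ⟨hnlIn.mpr h2.1, h2.2⟩, if_pos h2, head_piece_eq '\n' cs h2.1]
      · have h2' : ¬ (PySem.Chars.isIn ['\n'] cs = true ∧ PySem.Chars.find cs ['\n'] < 100) := by
          intro hx; exact h2 ⟨hnlIn.mp hx.1, hx.2⟩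
        rw [if_neg h2', if_neg h2]
  simp only [hshort]
  have hcnt : 2 < (PySem.Chars.splitOn cs ['\n']).length ↔ 1 < PySem.Chars.count cs ['\n'] := by
    rw [splitOn_single, splitC_length, count_single]
    omega
  by_cases hg : PySem.Chars.isIn ['-', '>']
      (if 10 < PySem.Chars.find cs ['.'] ∧ PySem.Chars.find cs ['.'] < 100 then
          PySem.Chars.slice cs none (some (PySem.Chars.find cs ['.'] + 1))
        else if 0 ≤ PySem.Chars.find cs ['\n'] ∧ PySem.Chars.find cs ['\n'] < 100 then
          PySem.Chars.slice cs none (some (PySem.Chars.find cs ['\n']))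
        else if 140 < cs.length then
          PySem.Chars.slice cs none (some 97) ++ ['.', '.', '.']
        else cs) = true ∧ 1 < PySem.Chars.count cs ['\n']
  · rw [dif_pos ⟨hg.1, hcnt.mpr hg.2⟩, dif_pos hg]
    have hq : 0 ≤ PySem.Chars.find cs ['\n'] := by
      rw [hnlIn.symm, isIn_single]
      exact decide_eq_true (mem_of_one_lt_count '\n' cs (by rw [← count_single]; exact hg.2))
    have hargs : PySem.Chars.strip (PySem.Chars.join ['\n'] ((PySem.Chars.splitOn cs ['\n']).drop 1))
        = PySem.Chars.strip (PySem.Chars.slice cs (some (PySem.Chars.find cs ['\n'] + 1)) none) := by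
      rw [tail_join_eq '\n' cs hq, PySem.Chars.slice_eq_listSlice,
        PySem.List.slice_from cs (by omega)]
      have : (PySem.Chars.find cs ['\n'] + 1).toNat = cs.idxOf '\n' + 1 := by
        rw [find_single, if_pos (mem_of_find_pos '\n' cs hq)]; omega
      rw [this]
    rw [hargs]
    exact ih _ (bRec_lt cs hg.2) _ rfl
  · have hg' : ¬ (PySem.Chars.isIn ['-', '>']
        (if 10 < PySem.Chars.find cs ['.'] ∧ PySem.Chars.find cs ['.'] < 100 then
            PySem.Chars.slice cs none (some (PySem.Chars.find cs ['.'] + 1))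
          else if 0 ≤ PySem.Chars.find cs ['\n'] ∧ PySem.Chars.find cs ['\n'] < 100 then
            PySem.Chars.slice cs none (some (PySem.Chars.find cs ['\n']))
          else if 140 < cs.length then
            PySem.Chars.slice cs none (some 97) ++ ['.', '.', '.']
          else cs) = true ∧ 2 < (PySem.Chars.splitOn cs ['\n']).length) := by
      intro hx; exact hg ⟨hx.1, hcnt.mp hx.2⟩
    rw [dif_neg hg', dif_neg hg]

-- ===== VERDICT (by name: the statement is the Claim_ definition above) =====
theorem short_doc_spec : Claim_equal_short_doc := by
  intro doc _
  unfold Spec_short_doc short_doc short_doc_alt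
  rw [core_eq]
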